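-- pv_equiv track=rewrite | github.com/joehubert/chatbot-platform-core | app/services/anthropic_client.py | _ensure_alternating_pattern
-- ===== SOURCE A (Python) =====
-- from typing import Dict, Any, Optional, List, AsyncGenerator
--
-- def _ensure_alternating_pattern(
--
--     messages: List[Dict[str, str]]
-- ) -> List[Dict[str, str]]:
--     """Ensure messages alternate between user and assistant"""
--     if not messages:
--         return messages
--
--     fixed_messages = []
--     last_role = None
--
--     for message in messages:
--         current_role = message["role"]
--
--         # If same role as previous, merge the content
--         if last_role == current_role and fixed_messages:
--             fixed_messages[-1]["content"] += "\n\n" + message["content"]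
--         else:
--             # If we have two user messages in a row, insert a brief assistant response
--             if last_role == "user" and current_role == "user" and fixed_messages:
--                 fixed_messages.append({
--                     "role": "assistant",
--                     "content": "I understand. Please continue."
--                 })
--
--             fixed_messages.append(message)
--             last_role = current_role
--
--     # Ensure we start with a user message
--     if fixed_messages and fixed_messages[0]["role"] == "assistant":
--         fixed_messages.insert(0, {
--             "role": "user",
--             "content": "Hello, I have a question."
--         })
--
--     return fixed_messages
-- ===== SOURCE B (Python) =====
-- def _ensure_alternating_pattern(messages):
--     """Ensure messages alternate between user and assistant"""
--     if not messages:
--         return messages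
--
--     # Phase 1: group into maximal runs of consecutive messages with the same role.
--     runs = []
--     for message in messages:
--         if runs and runs[-1][0]["role"] == message["role"]:
--             runs[-1].append(message)
--         else:
--             runs.append([message])
--
--     # Phase 2: collapse each run into its first dict (mutated in place).
--     fixed_messages = []
--     for run in runs:
--         head = run[0]
--         for message in run[1:]:
--             head["content"] += "\n\n" + message["content"]
--         fixed_messages.append(head)
--
--     if fixed_messages[0]["role"] == "assistant":
--         fixed_messages.insert(0, {
--             "role": "user",
--             "content": "Hello, I have a question."
--         })
--
--     return fixed_messages
-- ===== Notes on version B (the rewrite author's own statement) =====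
-- stated objective: alternative
-- what changed: Replaces A's single pass with last_role state (which also carries an unreachable insert-assistant branch) by a two-phase decomposition: first group messages into maximal consecutive same-role runs, then collapse each run into its mutated first dict; the greeting check is unchanged.
import Mathlib
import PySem

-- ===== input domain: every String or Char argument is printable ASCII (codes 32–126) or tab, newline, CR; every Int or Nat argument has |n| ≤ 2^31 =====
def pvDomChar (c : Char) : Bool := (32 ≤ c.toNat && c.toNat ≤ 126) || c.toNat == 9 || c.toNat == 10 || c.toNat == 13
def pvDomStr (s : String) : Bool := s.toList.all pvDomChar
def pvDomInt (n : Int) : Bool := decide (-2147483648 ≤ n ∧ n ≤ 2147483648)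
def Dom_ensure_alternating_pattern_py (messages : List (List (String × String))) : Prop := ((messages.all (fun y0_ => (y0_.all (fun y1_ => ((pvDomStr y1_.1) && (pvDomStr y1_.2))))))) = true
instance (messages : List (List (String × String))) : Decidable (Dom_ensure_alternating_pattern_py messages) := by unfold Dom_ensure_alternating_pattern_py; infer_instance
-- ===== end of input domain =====

-- B replaces A's single pass with last_role state by a two-phase decomposition (group into
-- consecutive same-role runs, then collapse each run into its first dict); equivalence is about
-- the RETURN value only (both Pythons mutate the run-head dicts' "content" in place identically).

-- shared dict primitives: m["role"] / m["content"] (total forms; Pre_ guarantees presence where read)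
def pvRole (m : List (String × String)) : String :=
  PySem.Dict.getD (PySem.Dict.mk m) "role" ""

def pvContent (m : List (String × String)) : String :=
  PySem.Dict.getD (PySem.Dict.mk m) "content" ""

-- h["content"] += "\n\n" + m["content"]  (in-place update of the first "content" entry)
def pvAppendContent (h m : List (String × String)) : List (String × String) :=
  (PySem.Dict.modify (PySem.Dict.mk h) "content" "" (fun v => v ++ "\n\n" ++ pvContent m)).items

def pvGreeting : List (String × String) := [("role", "user"), ("content", "Hello, I have a question.")]

-- ===== PORT A =====
-- one loop iteration of A: state = (fixed_messages, last_role)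
def pvStepA (st : List (List (String × String)) × Option String) (message : List (String × String)) :
    List (List (String × String)) × Option String :=
  let cur := pvRole message
  if st.2 = some cur ∧ st.1 ≠ [] then
    (st.1.dropLast ++ [pvAppendContent (st.1.getLast?.getD []) message], st.2)
  else
    let fixed' :=
      if st.2 = some "user" ∧ cur = "user" ∧ st.1 ≠ [] then
        st.1 ++ [[("role", "assistant"), ("content", "I understand. Please continue.")]]
      else st.1
    (fixed' ++ [message], some cur)

def ensure_alternating_pattern_py (messages : List (List (String × String))) : List (List (String × String)) :=
  if messages = [] then messages
  else
    let fixed := (messages.foldl pvStepA ([], none)).1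
    if fixed ≠ [] ∧ pvRole (fixed.headD []) = "assistant" then pvGreeting :: fixed
    else fixed

-- ===== PORT B =====
-- phase 1: group into maximal runs of consecutive same-role messages
def pvGroupStep (runs : List (List (List (String × String)))) (m : List (String × String)) :
    List (List (List (String × String))) :=
  match runs.getLast? with
  | none => [[m]]
  | some r => if pvRole (r.headD []) = pvRole m then runs.dropLast ++ [r ++ [m]] else runs ++ [[m]]

-- phase 2: collapse a run into its first dict
def pvMergeRun (run : List (List (String × String))) : List (String × String) :=
  match run with
  | [] => []
  | h :: t => t.foldl pvAppendContent h

def ensure_alternating_pattern_py_alt (messages : List (List (String × String))) : List (List (String × String)) :=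
  if messages = [] then messages
  else
    let out := (messages.foldl pvGroupStep []).map pvMergeRun
    if pvRole (out.headD []) = "assistant" then pvGreeting :: out
    else out

-- ===== PRECONDITION & SPEC =====
-- Pre_ excludes exactly the inputs where Python A raises KeyError: a message without a "role" key,
-- or two consecutive same-role messages (a merge) where either one lacks a "content" key.
def Pre_ensure_alternating_pattern_py (messages : List (List (String × String))) : Prop :=
  (∀ m ∈ messages, (PySem.Dict.get? (PySem.Dict.mk m) "role").isSome) ∧
  (∀ p ∈ messages.zip messages.tail, pvRole p.1 = pvRole p.2 →
    (PySem.Dict.get? (PySem.Dict.mk p.1) "content").isSome ∧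
    (PySem.Dict.get? (PySem.Dict.mk p.2) "content").isSome)
instance (messages : List (List (String × String))) : Decidable (Pre_ensure_alternating_pattern_py messages) := by unfold Pre_ensure_alternating_pattern_py; infer_instance

def pvWitness_ensure_alternating_pattern_py : (List (List (String × String))) :=
  [[("role", "assistant"), ("content", "hi")], [("role", "user"), ("content", "q")]]

def Spec_ensure_alternating_pattern_py (messages : List (List (String × String))) (out : List (List (String × String))) : Prop := out = ensure_alternating_pattern_py_alt messages
instance (messages : List (List (String × String))) (out : List (List (String × String))) : Decidable (Spec_ensure_alternating_pattern_py messages out) := by unfold Spec_ensure_alternating_pattern_py; infer_instance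

-- ===== CLAIM (what is proved, stated in full; the proofs are below) =====
def Claim_equal_ensure_alternating_pattern_py : Prop := ∀ (messages : List (List (String × String))), Dom_ensure_alternating_pattern_py messages → Pre_ensure_alternating_pattern_py messages → Spec_ensure_alternating_pattern_py messages (ensure_alternating_pattern_py messages)

-- ===== LEMMAS AND PROOFS =====

-- last run's first message's role: A's last_role variable
def pvLastRole (runs : List (List (List (String × String)))) : String :=
  pvRole ((runs.getLast?.getD []).headD [])

-- loop invariant: from matching states, A's fold tracks B's grouping fold
theorem pv_inv (l : List (List (String × String))) :
    ∀ (runs : List (List (List (String × String)))), runs ≠ [] → (∀ r ∈ runs, r ≠ []) →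
      (List.foldl pvGroupStep runs l ≠ [] ∧ ∀ r ∈ List.foldl pvGroupStep runs l, r ≠ []) ∧
      List.foldl pvStepA (runs.map pvMergeRun, some (pvLastRole runs)) l
        = ((List.foldl pvGroupStep runs l).map pvMergeRun,
           some (pvLastRole (List.foldl pvGroupStep runs l))) := by
  induction l with
  | nil => intro runs hne hall; exact ⟨⟨hne, hall⟩, rfl⟩
  | cons m t ih =>
    intro runs hne hall
    obtain ⟨rs, r, rfl⟩ := (List.eq_nil_or_concat runs).resolve_left hne
    have hr : r ≠ [] := hall r (by simp)
    obtain ⟨h, tr, rfl⟩ := List.exists_cons_of_ne_nil hr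
    simp only [List.concat_eq_append] at hne hall ⊢
    have hlast : (rs ++ [h :: tr]).getLast? = some (h :: tr) := by simp
    have hLR : pvLastRole (rs ++ [h :: tr]) = pvRole h := by
      simp [pvLastRole, hlast]
    simp only [List.foldl_cons]
    by_cases c : pvRole h = pvRole m
    · -- merge into the last run
      have hgs : pvGroupStep (rs ++ [h :: tr]) m = rs ++ [(h :: tr) ++ [m]] := by
        simp [pvGroupStep, hlast, c]
      have hsa : pvStepA ((rs ++ [h :: tr]).map pvMergeRun, some (pvLastRole (rs ++ [h :: tr]))) m
          = ((rs ++ [(h :: tr) ++ [m]]).map pvMergeRun, some (pvLastRole (rs ++ [(h :: tr) ++ [m]]))) := by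
        have hcond : (some (pvLastRole (rs ++ [h :: tr])) = some (pvRole m) ∧
            (rs ++ [h :: tr]).map pvMergeRun ≠ []) := by
          constructor
          · rw [hLR, c]
          · simp
        simp only [pvStepA, if_pos hcond, Prod.mk.injEq]
        constructor
        · simp [pvMergeRun, List.foldl_append]
        · simp [pvLastRole, hlast, c]
      rw [hsa, hgs]
      exact ih (rs ++ [(h :: tr) ++ [m]]) (by simp)
        (by intro x hx
            rcases List.mem_append.mp hx with hx | hx
            · exact hall x (List.mem_append.mpr (Or.inl hx))
            · simp at hx; simp [hx])
    · -- start a new run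
      have hgs : pvGroupStep (rs ++ [h :: tr]) m = (rs ++ [h :: tr]) ++ [[m]] := by
        simp [pvGroupStep, hlast, c]
      have hsa : pvStepA ((rs ++ [h :: tr]).map pvMergeRun, some (pvLastRole (rs ++ [h :: tr]))) m
          = (((rs ++ [h :: tr]) ++ [[m]]).map pvMergeRun, some (pvLastRole ((rs ++ [h :: tr]) ++ [[m]]))) := by
        have hcond : ¬ (some (pvLastRole (rs ++ [h :: tr])) = some (pvRole m) ∧
            (rs ++ [h :: tr]).map pvMergeRun ≠ []) := by
          rw [hLR]; intro ⟨hc, _⟩; exact c (Option.some.inj hc)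
        have hdead : ¬ (some (pvLastRole (rs ++ [h :: tr])) = some "user" ∧ pvRole m = "user" ∧
            (rs ++ [h :: tr]).map pvMergeRun ≠ []) := by
          rw [hLR]
          intro ⟨h1, h2, _⟩
          exact c (by rw [Option.some.inj h1, h2])
        simp only [pvStepA, if_neg hcond, if_neg hdead, Prod.mk.injEq]
        constructor
        · simp [pvMergeRun]
        · simp [pvLastRole]
      rw [hsa, hgs]
      exact ih ((rs ++ [h :: tr]) ++ [[m]]) (by simp)
        (by intro x hx
            rcases List.mem_append.mp hx with hx | hx
            · exact hall x hx
            · simp at hx; simp [hx])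

-- ===== VERDICT (by name: the statement is the Claim_ definition above) =====
theorem ensure_alternating_pattern_py_spec : Claim_equal_ensure_alternating_pattern_py := by
  intro messages _ _
  unfold Spec_ensure_alternating_pattern_py
  cases messages with
  | nil => rfl
  | cons m t =>
    unfold ensure_alternating_pattern_py ensure_alternating_pattern_py_alt
    simp only [List.foldl_cons, reduceCtorEq, if_false]
    have h0a : pvStepA ([], none) m = ([[m]].map pvMergeRun, some (pvLastRole [[m]])) := by
      simp [pvStepA, pvMergeRun, pvLastRole]
    have h0b : pvGroupStep [] m = [[m]] := by simp [pvGroupStep]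
    obtain ⟨⟨hne, _⟩, heq⟩ := pv_inv t [[m]] (by simp) (by simp)
    rw [h0a, h0b, heq]
    have hmapne : (List.foldl pvGroupStep [[m]] t).map pvMergeRun ≠ [] := by
      simpa using hne
    simp [hmapne]
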